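-- pv_equiv track=rewrite | github.com/Jazbarrionuev0/UPC-Formartter | pages/UPC_Formatter.py | format_skus
-- ===== SOURCE A (Python) =====
-- def format_skus(text):
--     raw_items = text.replace("\n", ",").split(",")
--     sku_list = [item.strip() for item in raw_items if item.strip()]
--     formatted = [f"'{sku}'" for sku in sku_list]
--
--     output_lines = []
--     for i in range(0, len(formatted), 10):
--         chunk = formatted[i:i+10]
--         line = ",".join(chunk)
--         if i + 10 < len(formatted):
--             line += ","
--         output_lines.append(line)
--
--     return "\n".join(output_lines)
-- ===== SOURCE B (Python) =====
-- def format_skus(text):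
--     out = []
--     count = 0
--     token = ""
--     for ch in text + "\n":
--         if ch == "\n" or ch == ",":
--             sku = token.strip()
--             token = ""
--             if sku:
--                 if count > 0:
--                     out.append(",\n" if count % 10 == 0 else ",")
--                 out.append("'" + sku + "'")
--                 count += 1
--         else:
--             token += ch
--     return "".join(out)
-- ===== Notes on version B (the rewrite author's own statement) =====
-- stated objective: alternative
-- what changed: Replaces A's staged pipeline (replace newlines with commas, split, strip/filter/quote comprehensions, then slice into 10-item chunks joined with commas and newline-joined lines) by a single character-level scan of the text plus a sentinel delimiter that accumulates a token, flushes it at each delimiter, and emits a per-item separator chosen by a running count (none for the first item, comma+newline every 10th item, comma otherwise).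
import Mathlib
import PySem

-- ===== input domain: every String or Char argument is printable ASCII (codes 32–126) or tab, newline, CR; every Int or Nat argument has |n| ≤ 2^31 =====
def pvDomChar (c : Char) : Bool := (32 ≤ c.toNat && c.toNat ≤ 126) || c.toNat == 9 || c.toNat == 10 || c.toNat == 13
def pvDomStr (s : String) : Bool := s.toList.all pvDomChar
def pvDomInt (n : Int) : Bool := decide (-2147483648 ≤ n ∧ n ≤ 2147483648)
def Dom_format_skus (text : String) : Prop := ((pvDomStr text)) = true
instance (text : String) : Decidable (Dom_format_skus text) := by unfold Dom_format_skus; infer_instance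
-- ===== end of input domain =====

-- B replaces A's staged pipeline (replace/split/strip/quote comprehensions + chunk-of-10 slicing)
-- by a single character-level scan with a token accumulator and a running item count; same cost.

-- ===== PORT A =====
def format_skus (text : String) : String :=
  let raw_items := PySem.Chars.splitOn (PySem.Chars.replace text.toList ['\n'] [',']) [',']
  let sku_list := (raw_items.filter (fun item => PySem.Chars.strip item ≠ [])).map
      (fun item => PySem.Chars.strip item)
  let formatted := sku_list.map (fun sku => '\'' :: sku ++ ['\''])
  let output_lines := (PySem.List.pyRange 0 (PySem.List.len formatted) 10).foldl
      (fun acc i =>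
        let chunk := PySem.List.slice formatted (some i) (some (i + 10))
        let line := PySem.Chars.join [','] chunk
        acc ++ [if i + 10 < PySem.List.len formatted then line ++ [','] else line]) []
  String.ofList (PySem.Chars.join ['\n'] output_lines)

-- ===== PORT B =====
-- the loop body of Source B's character scan: state = (out, count, token)
def bStep (st : List (List Char) × Nat × List Char) (ch : Char) :
    List (List Char) × Nat × List Char :=
  let (out, count, token) := st
  if ch = '\n' ∨ ch = ',' then
    let sku := PySem.Chars.strip token
    if sku ≠ [] then
      ((if 0 < count then out ++ [if count % 10 = 0 then [',', '\n'] else [',']] else out)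
         ++ ['\'' :: sku ++ ['\'']], count + 1, [])
    else (out, count, [])
  else (out, count, token ++ [ch])

def format_skus_alt (text : String) : String :=
  let st := (text.toList ++ ['\n']).foldl bStep ([], 0, [])
  String.ofList (PySem.Chars.join [] st.1)

-- ===== PRECONDITION & SPEC =====
def Spec_format_skus (text : String) (out : String) : Prop := out = format_skus_alt text
instance (text : String) (out : String) : Decidable (Spec_format_skus text out) := by unfold Spec_format_skus; infer_instance

-- ===== CLAIM (what is proved, stated in full; the proofs are below) =====
def Claim_equal_format_skus : Prop := ∀ (text : String), Dom_format_skus text → Spec_format_skus text (format_skus text)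

-- ===== LEMMAS AND PROOFS =====

-- B's separator-per-index output, as a recursive spec (idx is the index of the head).
def bcat (l : List (List Char)) (idx : Nat) : List Char :=
  match l with
  | [] => []
  | x :: t =>
      (if 0 < idx then (if idx % 10 = 0 then [',', '\n'] else [',']) else []) ++ x ++ bcat t (idx + 1)

-- A's chunk lines, as a recursive spec.
def achList (l : List (List Char)) : List (List Char) :=
  if h : l = [] then [] else
    (PySem.Chars.join [','] (l.take 10) ++ (if 10 < l.length then [','] else [])) :: achList (l.drop 10)
termination_by l.length
decreasing_by
  have hl : 0 < l.length := List.length_pos_iff.mpr h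
  simp only [List.length_drop]
  omega

theorem bcat_nil (idx : Nat) : bcat [] idx = [] := rfl

theorem join_empty (ps : List (List Char)) : PySem.Chars.join [] ps = ps.flatten := by
  induction ps with
  | nil => simp [PySem.Chars.join_nil]
  | cons p rest ih =>
      cases rest with
      | nil => simp [PySem.Chars.join_singleton]
      | cons q r =>
          rw [PySem.Chars.join_cons_cons]
          simp [ih]

theorem join_comma (x : List Char) (c : List (List Char)) :
    PySem.Chars.join [','] (x :: c) = x ++ (c.map (',' :: ·)).flatten := by
  induction c generalizing x with
  | nil => simp [PySem.Chars.join_singleton]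
  | cons q r ih =>
      rw [PySem.Chars.join_cons_cons, ih]
      simp

-- interior of a chunk: indices not ≡ 0 (mod 10) all get separator ","
theorem bcat_in (c : List (List Char)) (rest : List (List Char)) (idx : Nat)
    (h1 : idx % 10 ≠ 0) (h2 : idx % 10 + c.length ≤ 10) :
    bcat (c ++ rest) idx = (c.map (',' :: ·)).flatten ++ bcat rest (idx + c.length) := by
  induction c generalizing idx with
  | nil => simp
  | cons x t ih =>
      have hpos : 0 < idx := Nat.pos_of_ne_zero (by omega)
      simp only [List.cons_append, bcat, if_pos hpos, if_neg h1]
      cases t with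
      | nil => simp
      | cons y u =>
          rw [ih (idx + 1) (by simp at h2; omega) (by simp at h2 ⊢; omega)]
          rw [show idx + 1 + (y :: u).length = idx + (x :: y :: u).length by simp; omega]
          simp

-- one chunk of ≤ 10 items starting at a multiple of 10
theorem bcat_chunk (x : List Char) (c rest : List (List Char)) (idx : Nat)
    (h0 : idx % 10 = 0) (hle : (x :: c).length ≤ 10) :
    bcat ((x :: c) ++ rest) idx =
      (if 0 < idx then [',', '\n'] else []) ++ PySem.Chars.join [','] (x :: c)
        ++ bcat rest (idx + (x :: c).length) := by
  simp only [List.cons_append, bcat, h0, reduceIte]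
  rw [bcat_in c rest (idx + 1) (by omega) (by simp at hle ⊢; omega), join_comma]
  rw [show idx + 1 + c.length = idx + (x :: c).length by simp; omega]
  split <;> simp

theorem achList_ne_nil (l : List (List Char)) (h : l ≠ []) : achList l ≠ [] := by
  rw [achList]; simp [h]

-- A's lines joined with newlines equal the separator catenation bcat
theorem join_achList (l : List (List Char)) (idx : Nat) (h0 : idx % 10 = 0) :
    bcat l idx =
      (if l = [] then [] else
        (if 0 < idx then [',', '\n'] else []) ++ PySem.Chars.join ['\n'] (achList l)) := by
  induction hn : l.length using Nat.strong_induction_on generalizing l idx with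
  | _ n ih =>
  by_cases h : l = []
  · subst h; simp [bcat]
  · rw [if_neg h]
    obtain ⟨y, c, hc⟩ := List.exists_cons_of_ne_nil
      (show l.take 10 ≠ [] by simp [List.take_eq_nil_iff, h])
    have hsplit : l = (y :: c) ++ l.drop 10 := by rw [← hc, List.take_append_drop]
    have hle : (y :: c).length ≤ 10 := by rw [← hc]; simp
    conv_lhs => rw [hsplit]
    rw [bcat_chunk y c (l.drop 10) idx h0 hle]
    by_cases hrest : l.drop 10 = []
    · have hl10 : l.length ≤ 10 := by
        have := List.length_drop (l := l) (i := 10); rw [hrest] at this; simp at this; omega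
      rw [hrest, bcat_nil]
      rw [achList, dif_neg h, hrest, hc]
      rw [show achList ([] : List (List Char)) = [] by rw [achList]; simp]
      rw [if_neg (show ¬ 10 < l.length by omega)]
      simp [PySem.Chars.join_singleton]
    · have hgt : 10 < l.length := by
        have := List.length_drop (l := l) (i := 10)
        have hp : 0 < (l.drop 10).length := List.length_pos_iff.mpr hrest
        omega
      have hlen10 : (y :: c).length = 10 := by rw [← hc]; simp; omega
      have ihr := ih (l.drop 10).length (by rw [← hn]; simp; omega)
        (l.drop 10) (idx + (y :: c).length) (by rw [hlen10]; omega) rfl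
      rw [if_neg hrest] at ihr
      conv_rhs => rw [achList]
      rw [dif_neg h, hc, if_pos hgt]
      rw [ihr, if_pos (show 0 < idx + (y :: c).length by simp)]
      obtain ⟨z, zs, hz⟩ := List.exists_cons_of_ne_nil (achList_ne_nil _ hrest)
      rw [hz, PySem.Chars.join_cons_cons]
      simp

-- pyRange with step 10 peels its first element
theorem pyRange_ten_cons (n : Int) (hn : 0 < n) :
    PySem.List.pyRange 0 n 10 = 0 :: (PySem.List.pyRange 0 (n - 10) 10).map (fun x => 10 + x) := by
  rw [PySem.List.pyRange_of_pos 0 n (by norm_num), PySem.List.pyRange_of_pos 0 (n - 10) (by norm_num)]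
  rw [if_pos hn]
  by_cases h10 : 0 < n - 10
  · rw [if_pos h10]
    have hm : (n - 0 + 10 - 1) / 10 = (n - 10 - 0 + 10 - 1) / 10 + 1 := by omega
    rw [hm]
    have hmn : 0 ≤ (n - 10 - 0 + 10 - 1) / 10 := by omega
    rw [show ((n - 10 - 0 + 10 - 1) / 10 + 1).toNat = ((n - 10 - 0 + 10 - 1) / 10).toNat + 1 by omega]
    rw [List.range_succ_eq_map]
    simp [List.map_map, Function.comp]
    intro a _
    ring
  · rw [if_neg h10]
    have hm : (n - 0 + 10 - 1) / 10 = 1 := by omega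
    rw [hm]
    simp [List.range_succ]

-- the chunk loop of A computes achList
theorem chunks_eq_achList (l : List (List Char)) :
    (PySem.List.pyRange 0 (PySem.List.len l) 10).map
      (fun i =>
        if i + 10 < PySem.List.len l then
          PySem.Chars.join [','] (PySem.List.slice l (some i) (some (i + 10))) ++ [',']
        else PySem.Chars.join [','] (PySem.List.slice l (some i) (some (i + 10)))) = achList l := by
  induction hn : l.length using Nat.strong_induction_on generalizing l with
  | _ n ih =>
  by_cases h : l = []
  · subst h
    rw [achList]
    simp [PySem.List.len_eq, PySem.List.pyRange_of_pos 0 0 (by norm_num : (0:Int) < 10)]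
  · have hpos : 0 < l.length := List.length_pos_iff.mpr h
    rw [PySem.List.len_eq, pyRange_ten_cons _ (by exact_mod_cast hpos)]
    rw [List.map_cons, List.map_map]
    rw [achList]; rw [dif_neg h]
    congr 1
    · -- head chunk
      have hsl : PySem.List.slice l (some 0) (some (0 + 10)) = l.take 10 := by
        rw [show ((0:Int) + 10) = ((0:Nat):Int) + ((10:Nat):Int) by norm_num,
            show (some (0:Int)) = some ((0:Nat):Int) by norm_num,
            PySem.List.slice_natCast_add]
        simp
      rw [hsl]
      by_cases hc : (0:Int) + 10 < (l.length : Int)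
      · rw [if_pos hc, if_pos (by exact_mod_cast (by omega : (10:Int) < (l.length:Int)))]
      · have hn10 : ¬ 10 < l.length := fun hh => hc (by push_cast; omega)
        rw [if_neg hc, if_neg hn10]
        simp
    · -- tail chunks = achList (l.drop 10)
      rw [← ih (l.drop 10).length (by simp; omega) (l.drop 10) rfl]
      rw [PySem.List.len_eq]
      have hlen : ((l.drop 10).length : Int) = (l.length : Int) - 10 ∨ (l.drop 10) = [] := by
        by_cases h10 : 10 ≤ l.length
        · left; simp; omega
        · right; simp; omega
      rcases hlen with hlen | hnil
      · rw [hlen]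
        refine List.map_congr_left fun x hx => ?_
        have hxb : 0 ≤ x := by
          have := (PySem.List.mem_pyRange_iff_of_pos (by norm_num : (0:Int) < 10) x).mp hx
          omega
        obtain ⟨k, hk⟩ : ∃ k : Nat, x = (k : Int) := ⟨x.toNat, by omega⟩
        subst hk
        simp only [Function.comp_apply]
        have hsl : PySem.List.slice l (some (10 + (k:Int))) (some (10 + (k:Int) + 10)) =
            PySem.List.slice (l.drop 10) (some (k:Int)) (some ((k:Int) + 10)) := by
          rw [show (10 + (k:Int)) = (((10 + k : Nat)):Int) by push_cast; ring,
              show ((((10 + k : Nat)):Int) + 10) = (((10 + k : Nat)):Int) + ((10:Nat):Int) by norm_num,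
              PySem.List.slice_natCast_add,
              show ((k:Int) + 10) = ((k:Nat):Int) + ((10:Nat):Int) by norm_num,
              PySem.List.slice_natCast_add]
          rw [List.drop_drop]
        rw [hsl]
        have hcond : (10 + (k:Int) + 10 < (l.length:Int)) ↔ ((k:Int) + 10 < (l.length:Int) - 10) := by
          omega
        by_cases hcc : (k:Int) + 10 < (l.length:Int) - 10
        · rw [if_pos (hcond.mpr hcc), if_pos hcc]
        · rw [if_neg (fun hh => hcc (hcond.mp hh)), if_neg hcc]
      · rw [hnil]
        have h10 : l.length ≤ 10 := by
          have := List.length_drop (l := l) (i := 10); rw [hnil] at this; simp at this; omega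
        rw [show ((([] : List (List Char)).length : Int)) = 0 by simp]
        rw [PySem.List.pyRange_of_pos 0 ((l.length : Int) - 10) (by norm_num : (0:Int) < 10)]
        rw [PySem.List.pyRange_of_pos 0 0 (by norm_num : (0:Int) < 10)]
        rw [if_neg (by omega), if_neg (by norm_num)]
        simp

-- === splitting specs ===

-- split a char list on a single delimiter character (spec for splitOn with a 1-char sep)
def mySplit (s : List Char) (d : Char) : List (List Char) :=
  match s with
  | [] => [[]]
  | c :: t => if c = d then [] :: mySplit t d else (mySplit t d).modifyHead (c :: ·)

-- split on either delimiter ',' or '\n' (what A's replace-then-split and B's scan both compute)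
def pieces (s : List Char) : List (List Char) :=
  match s with
  | [] => [[]]
  | c :: t => if c = '\n' ∨ c = ',' then [] :: pieces t else (pieces t).modifyHead (c :: ·)

theorem mySplit_ne_nil (s : List Char) (d : Char) : mySplit s d ≠ [] := by
  cases s with
  | nil => simp [mySplit]
  | cons c t =>
      simp only [mySplit]
      split
      · simp
      · cases h : mySplit t d with
        | nil => exact absurd h (mySplit_ne_nil t d)
        | cons a b => simp

theorem pieces_ne_nil (s : List Char) : pieces s ≠ [] := by
  cases s with
  | nil => simp [pieces]
  | cons c t =>
      simp only [pieces]
      split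
      · simp
      · cases h : pieces t with
        | nil => exact absurd h (pieces_ne_nil t)
        | cons a b => simp

-- replace with single-char old/new is a map
theorem replace_go_single (o n : Char) (fuel : Nat) (l acc : List Char) (hf : l.length ≤ fuel) :
    PySem.Chars.replace.go [o] [n] fuel l acc =
      acc.reverse ++ l.map (fun c => if c = o then n else c) := by
  induction fuel generalizing l acc with
  | zero =>
      have : l = [] := List.eq_nil_of_length_eq_zero (by omega)
      subst this
      simp [PySem.Chars.replace.go]
  | succ fuel ih =>
      cases l with
      | nil => simp [PySem.Chars.replace.go]
      | cons c t =>
          simp only [PySem.Chars.replace.go]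
          by_cases hco : c = o
          · rw [if_pos (by simp [List.isPrefixOf, hco])]
            simp only [List.length_cons] at hf
            rw [ih _ _ (by simpa using Nat.le_of_succ_le_succ hf)]
            simp [hco]
          · rw [if_neg (by simp [List.isPrefixOf]; exact fun h => absurd h.symm hco)]
            simp only [List.length_cons] at hf
            rw [ih _ _ (Nat.le_of_succ_le_succ hf)]
            simp [hco]

theorem replace_single (o n : Char) (s : List Char) :
    PySem.Chars.replace s [o] [n] = s.map (fun c => if c = o then n else c) := by
  rw [PySem.Chars.replace]
  rw [if_neg (by simp)]
  exact replace_go_single o n s.length s [] le_rfl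

-- attach a prefix to the head piece
def attachHead (p : List Char) (ps : List (List Char)) : List (List Char) :=
  match ps with
  | [] => [p]
  | x :: xs => (p ++ x) :: xs

theorem attachHead_nil_of_ne (ps : List (List Char)) (h : ps ≠ []) : attachHead [] ps = ps := by
  cases ps with
  | nil => exact absurd rfl h
  | cons x xs => simp [attachHead]

-- splitOn with a single-char sep is mySplit
theorem splitOn_go_single (d : Char) (fuel : Nat) (l cur : List Char) (acc : List (List Char))
    (hf : l.length ≤ fuel) :
    PySem.Chars.splitOn.go [d] fuel l cur acc =
      acc.reverse ++ attachHead cur.reverse (mySplit l d) := by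
  induction fuel generalizing l cur acc with
  | zero =>
      have : l = [] := List.eq_nil_of_length_eq_zero (by omega)
      subst this
      simp [PySem.Chars.splitOn.go, mySplit, attachHead]
  | succ fuel ih =>
      cases l with
      | nil => simp [PySem.Chars.splitOn.go, mySplit, attachHead]
      | cons c t =>
          simp only [PySem.Chars.splitOn.go]
          simp only [List.length_cons] at hf
          by_cases hcd : c = d
          · rw [if_pos (by simp [List.isPrefixOf, hcd])]
            simp only [List.length_cons, List.length_nil, Nat.zero_add, List.drop_succ_cons,
              List.drop_zero]
            rw [ih t [] (cur.reverse :: acc) (Nat.le_of_succ_le_succ hf)]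
            rw [List.reverse_nil, attachHead_nil_of_ne _ (mySplit_ne_nil t d)]
            simp [mySplit, hcd, attachHead]
          · rw [if_neg (by simp [List.isPrefixOf]; exact fun h => absurd h.symm hcd)]
            rw [ih t (c :: cur) acc (Nat.le_of_succ_le_succ hf)]
            simp only [mySplit, if_neg hcd]
            obtain ⟨x, xs, hx⟩ := List.exists_cons_of_ne_nil (mySplit_ne_nil t d)
            rw [hx]
            simp [attachHead]

theorem splitOn_single (d : Char) (s : List Char) :
    PySem.Chars.splitOn s [d] = mySplit s d := by
  rw [PySem.Chars.splitOn, splitOn_go_single d (s.length + 1) s [] [] (by omega)]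
  simp [attachHead_nil_of_ne _ (mySplit_ne_nil s d)]

-- replacing '\n' by ',' then splitting on ',' = splitting on either delimiter
theorem mySplit_map_eq_pieces (s : List Char) :
    mySplit (s.map (fun c => if c = '\n' then ',' else c)) ',' = pieces s := by
  induction s with
  | nil => simp [mySplit, pieces]
  | cons c t ih =>
      simp only [List.map_cons, mySplit, pieces]
      by_cases h : c = '\n' ∨ c = ','
      · rcases h with h | h <;> simp [h, ih]
      · push_neg at h
        rw [if_neg h.1, if_neg h.2, if_neg (by push_neg; exact h), ih]

-- === B's scan ===

def quoteChunk (sku : List Char) : List Char := '\'' :: sku ++ ['\'']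

def flushT (st : List (List Char) × Nat) (t : List Char) : List (List Char) × Nat :=
  let sku := PySem.Chars.strip t
  if sku ≠ [] then
    ((if 0 < st.2 then st.1 ++ [if st.2 % 10 = 0 then [',', '\n'] else [',']] else st.1)
       ++ [quoteChunk sku], st.2 + 1)
  else st

-- B's scan over s ++ ['\n'] flushes exactly the pieces of s
theorem scan_eq_pieces (s : List Char) (out : List (List Char)) (count : Nat) (tok : List Char) :
    (s ++ ['\n']).foldl bStep (out, count, tok) =
      (((attachHead tok (pieces s)).foldl flushT (out, count)).1,
       ((attachHead tok (pieces s)).foldl flushT (out, count)).2, ([] : List Char)) := by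
  induction s generalizing out count tok with
  | nil =>
      simp only [List.nil_append, List.foldl_cons, List.foldl_nil, pieces, attachHead,
        List.append_nil]
      by_cases h : PySem.Chars.strip tok = []
      · simp [bStep, flushT, h]
      · simp [bStep, flushT, h, quoteChunk]
  | cons c t ih =>
      simp only [List.cons_append, List.foldl_cons]
      by_cases h : c = '\n' ∨ c = ','
      · have hstate : bStep (out, count, tok) c =
            ((flushT (out, count) tok).1, (flushT (out, count) tok).2, ([] : List Char)) := by
          simp only [bStep, if_pos h, flushT, quoteChunk]
          by_cases hs : PySem.Chars.strip tok = [] <;> simp [hs]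
        rw [hstate, ih]
        rw [attachHead_nil_of_ne _ (pieces_ne_nil t)]
        simp [pieces, if_pos h, attachHead]
      · have hc : ¬ (c = '\n' ∨ c = ',') := h
        simp only [bStep, if_neg hc]
        rw [ih]
        simp only [pieces, if_neg hc]
        obtain ⟨x, xs, hx⟩ := List.exists_cons_of_ne_nil (pieces_ne_nil t)
        rw [hx]
        simp [attachHead]

-- the quoted nonempty stripped pieces
def qlist (ts : List (List Char)) : List (List Char) :=
  ((ts.map (fun t => PySem.Chars.strip t)).filter (fun t => t ≠ [])).map quoteChunk

-- the flush fold produces bcat of the quoted list, with the count tracking its length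
theorem flushT_spec (ts : List (List Char)) (out : List (List Char)) (count : Nat) :
    (ts.foldl flushT (out, count)).1.flatten = out.flatten ++ bcat (qlist ts) count ∧
    (ts.foldl flushT (out, count)).2 = count + (qlist ts).length := by
  induction ts generalizing out count with
  | nil => simp [qlist, bcat]
  | cons t ts ih =>
      simp only [List.foldl_cons]
      by_cases h : PySem.Chars.strip t = []
      · have hf : flushT (out, count) t = (out, count) := by simp [flushT, h]
        rw [hf]
        have hq : qlist (t :: ts) = qlist ts := by simp [qlist, h]
        rw [hq]
        exact ih out count
      · have hf : flushT (out, count) t =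
            ((if 0 < count then out ++ [if count % 10 = 0 then [',', '\n'] else [',']] else out)
               ++ [quoteChunk (PySem.Chars.strip t)], count + 1) := by
          simp [flushT, h]
        rw [hf]
        have hq : qlist (t :: ts) = quoteChunk (PySem.Chars.strip t) :: qlist ts := by
          simp [qlist, h]
        rw [hq]
        obtain ⟨ih1, ih2⟩ := ih ((if 0 < count then
            out ++ [if count % 10 = 0 then [',', '\n'] else [',']] else out)
              ++ [quoteChunk (PySem.Chars.strip t)]) (count + 1)
        refine ⟨?_, by rw [ih2]; simp; omega⟩
        rw [ih1]
        simp only [bcat]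
        split <;> simp

-- A's filter-then-strip equals strip-then-filter
theorem filter_strip_comm (l : List (List Char)) :
    ((l.filter (fun item => PySem.Chars.strip item ≠ [])).map (fun item => PySem.Chars.strip item))
      = (l.map (fun t => PySem.Chars.strip t)).filter (fun t => t ≠ []) := by
  rw [List.filter_map]
  rfl

-- ===== VERDICT (by name: the statement is the Claim_ definition above) =====
theorem format_skus_spec : Claim_equal_format_skus := by
  intro text _
  unfold Spec_format_skus format_skus format_skus_alt
  simp only []
  -- B side
  have h1 : ((text.toList ++ ['\n']).foldl bStep ([], 0, [])).1
      = ((attachHead [] (pieces text.toList)).foldl flushT ([], 0)).1 := by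
    rw [scan_eq_pieces text.toList [] 0 []]
  rw [h1, attachHead_nil_of_ne _ (pieces_ne_nil text.toList)]
  rw [join_empty]
  obtain ⟨hb1, _⟩ := flushT_spec (pieces text.toList) [] 0
  rw [hb1]
  simp only [List.flatten_nil, List.nil_append]
  -- A side
  rw [replace_single, splitOn_single, mySplit_map_eq_pieces]
  rw [PySem.List.foldl_append_singleton_eq_map, chunks_eq_achList]
  rw [filter_strip_comm]
  have := join_achList ((((pieces text.toList).map (fun t => PySem.Chars.strip t)).filter
      (fun t => t ≠ [])).map (fun sku => '\'' :: sku ++ ['\''])) 0 (by norm_num)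
  rw [show (fun sku => '\'' :: sku ++ ['\'']) = quoteChunk from rfl] at this ⊢
  rw [show qlist (pieces text.toList) = (((pieces text.toList).map
      (fun t => PySem.Chars.strip t)).filter (fun t => t ≠ [])).map quoteChunk from rfl]
  rw [this]
  by_cases h : (((pieces text.toList).map (fun t => PySem.Chars.strip t)).filter
      (fun t => t ≠ [])).map quoteChunk = []
  · rw [if_pos h, h]
    rw [show achList ([] : List (List Char)) = [] by rw [achList]; simp]
    simp [PySem.Chars.join_nil]
  · rw [if_neg h]
    simp
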